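-- pv_equiv track=rewrite | github.com/lgallogomez/holbertonschool-higher_level_programming | python-data_structures/11-delete_at.py | delete_at
-- ===== SOURCE A (Python) =====
-- def delete_at(my_list=[], idx=0):
--     new_l = list()
--     i = 0
--     for i in range(len(my_list)):
--         if i != idx:
--             new_l.append(my_list[i])
--             i += 1
--         else:
--             i += 1
--     return (new_l)
-- ===== SOURCE B (Python) =====
-- def delete_at(my_list=[], idx=0):
--     new_l = list(my_list)
--     if 0 <= idx < len(new_l):
--         del new_l[idx]
--     return new_l
-- ===== Notes on version B (the rewrite author's own statement) =====
-- stated objective: simpler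
-- what changed: A rebuilds the result element by element with an index loop that filters out position idx; B copies the whole list once (list(my_list)) and performs a single guarded in-place deletion (del new_l[idx] when 0 <= idx < len), leaving the copy untouched for negative or out-of-range idx.
import Mathlib
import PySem

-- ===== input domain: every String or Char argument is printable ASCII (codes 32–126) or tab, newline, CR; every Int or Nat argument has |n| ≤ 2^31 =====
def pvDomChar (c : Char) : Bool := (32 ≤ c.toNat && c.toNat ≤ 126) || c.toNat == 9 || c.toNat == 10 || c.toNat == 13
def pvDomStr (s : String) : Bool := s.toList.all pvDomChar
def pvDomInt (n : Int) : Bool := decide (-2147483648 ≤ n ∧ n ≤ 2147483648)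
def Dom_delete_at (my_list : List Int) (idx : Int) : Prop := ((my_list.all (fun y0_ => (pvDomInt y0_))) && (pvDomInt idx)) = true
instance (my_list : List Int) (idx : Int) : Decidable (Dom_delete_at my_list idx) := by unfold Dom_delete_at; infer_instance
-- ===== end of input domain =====

-- B replaces A's index loop that re-builds the list element by element with a whole-list
-- copy plus one guarded deletion (objective: simpler).

-- ===== PORT A =====
-- 'for i in range(len(my_list)): if i != idx: new_l.append(my_list[i])'
-- my_list[i] with 0 ≤ i < len is always in range, so pyGetD with default 0 is exact here.
def delete_at (my_list : List Int) (idx : Int) : List Int :=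
  (PySem.List.pyRange 0 (my_list.length : Int) 1).foldl
    (fun new_l i => if i ≠ idx then new_l ++ [PySem.List.pyGetD my_list i 0] else new_l) []

-- ===== PORT B =====
-- 'new_l = list(my_list); if 0 <= idx < len(new_l): del new_l[idx]; return new_l'
def delete_at_alt (my_list : List Int) (idx : Int) : List Int :=
  let new_l := my_list
  if 0 ≤ idx ∧ idx < (new_l.length : Int) then new_l.eraseIdx idx.toNat else new_l

-- ===== PRECONDITION & SPEC =====
def Spec_delete_at (my_list : List Int) (idx : Int) (out : List Int) : Prop := out = delete_at_alt my_list idx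
instance (my_list : List Int) (idx : Int) (out : List Int) : Decidable (Spec_delete_at my_list idx out) := by unfold Spec_delete_at; infer_instance

-- ===== CLAIM (what is proved, stated in full; the proofs are below) =====
def Claim_equal_delete_at : Prop := ∀ (my_list : List Int) (idx : Int), Dom_delete_at my_list idx → Spec_delete_at my_list idx (delete_at my_list idx)

-- ===== LEMMAS AND PROOFS =====

-- a prefix index loop reads the prefix: map of pyGetD over range(0, j) is take j
lemma map_pyGetD_pyRange_take (l : List Int) (j : Nat) (hj : j ≤ l.length) :
    (PySem.List.pyRange 0 (j : Int) 1).map (fun i => PySem.List.pyGetD l i 0) = l.take j := by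
  induction j with
  | zero => simp [PySem.List.pyRange_one_eq_nil]
  | succ k ih =>
      have hk : k < l.length := by omega
      push_cast
      rw [PySem.List.pyRange_one_succ_right (by omega : (0:Int) ≤ (k:Int)), List.map_append,
        ih (by omega), List.take_add_one]
      simp [PySem.List.pyGetD_natCast, List.getD_eq_getElem?_getD, List.getElem?_eq_getElem hk]

theorem delete_at_spec_aux (my_list : List Int) (idx : Int) :
    delete_at my_list idx = delete_at_alt my_list idx := by
  unfold delete_at delete_at_alt
  have hfold := PySem.List.foldl_append_if (fun i => decide (i ≠ idx))
    (fun i => PySem.List.pyGetD my_list i 0) (PySem.List.pyRange 0 (my_list.length : Int) 1) []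
  simp only [decide_eq_true_eq, List.nil_append] at hfold
  rw [hfold]
  by_cases h : 0 ≤ idx ∧ idx < (my_list.length : Int)
  · -- idx in range: split the range at idx, the filter drops exactly idx
    obtain ⟨h0, hlt⟩ := h
    have hsplit : PySem.List.pyRange 0 (my_list.length : Int) 1
        = PySem.List.pyRange 0 idx 1 ++ PySem.List.pyRange idx (my_list.length : Int) 1 :=
      PySem.List.pyRange_one_append 0 idx _ h0 (le_of_lt hlt)
    have hcons : PySem.List.pyRange idx (my_list.length : Int) 1
        = idx :: PySem.List.pyRange (idx + 1) (my_list.length : Int) 1 :=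
      PySem.List.pyRange_one_cons hlt
    rw [hsplit, hcons, if_pos ⟨h0, hlt⟩]
    have hidx : idx = (idx.toNat : Int) := (Int.toNat_of_nonneg h0).symm
    have h1 : (PySem.List.pyRange 0 idx 1).filter (fun i => decide (i ≠ idx))
        = PySem.List.pyRange 0 idx 1 := by
      apply List.filter_eq_self.2
      intro a ha
      have := (PySem.List.mem_pyRange_one).1 ha
      simp; omega
    have h2 : (PySem.List.pyRange (idx + 1) (my_list.length : Int) 1).filter
        (fun i => decide (i ≠ idx)) = PySem.List.pyRange (idx + 1) (my_list.length : Int) 1 := by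
      apply List.filter_eq_self.2
      intro a ha
      have := (PySem.List.mem_pyRange_one).1 ha
      simp; omega
    rw [List.filter_append, List.filter_cons, h1, h2]
    simp only [ne_eq, not_true_eq_false, decide_false, Bool.false_eq_true, if_false]
    rw [List.map_append]
    have htake : (PySem.List.pyRange 0 idx 1).map (fun i => PySem.List.pyGetD my_list i 0)
        = my_list.take idx.toNat := by
      rw [hidx]; exact map_pyGetD_pyRange_take my_list idx.toNat (by omega)
    have hdrop : (PySem.List.pyRange (idx + 1) (my_list.length : Int) 1).map
        (fun i => PySem.List.pyGetD my_list i 0) = my_list.drop (idx + 1).toNat :=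
      PySem.List.map_pyGetD_pyRange' my_list 0 (by omega)
    rw [htake, hdrop, List.eraseIdx_eq_take_drop_succ,
      (by omega : (idx + 1).toNat = idx.toNat + 1)]
  · -- idx out of range: the filter keeps everything, the loop copies the list
    rw [if_neg h]
    have h1 : (PySem.List.pyRange 0 (my_list.length : Int) 1).filter
        (fun i => decide (i ≠ idx)) = PySem.List.pyRange 0 (my_list.length : Int) 1 := by
      apply List.filter_eq_self.2
      intro a ha
      have := (PySem.List.mem_pyRange_one).1 ha
      simp; omega
    rw [h1]
    exact PySem.List.map_pyGetD_pyRange_zero' my_list 0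

-- ===== VERDICT (by name: the statement is the Claim_ definition above) =====
theorem delete_at_spec : Claim_equal_delete_at := by
  intro my_list idx _
  unfold Spec_delete_at
  exact delete_at_spec_aux my_list idx
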